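-- pv_equiv track=rewrite | github.com/MrBrantCode/unitest_baseline | mut_generate/mist_train_cf/cf_15824/solution.py | categorize_and_sort
-- ===== SOURCE A (Python) =====
-- def merge_sort(arr):
--     if len(arr) <= 1:
--         return arr
--
--     mid = len(arr) // 2
--     left_half = arr[:mid]
--     right_half = arr[mid:]
--
--     left_half = merge_sort(left_half)
--     right_half = merge_sort(right_half)
--
--     return merge(left_half, right_half)
--
-- def merge(left_half, right_half):
--     result = []
--     left_index = 0
--     right_index = 0
--
--     while left_index < len(left_half) and right_index < len(right_half):
--         if left_half[left_index] < right_half[right_index]: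
--             result.append(left_half[left_index])
--             left_index += 1
--         else:
--             result.append(right_half[right_index])
--             right_index += 1
--
--     result.extend(left_half[left_index:])
--     result.extend(right_half[right_index:])
--
--     return result
--
-- def categorize_and_sort(arr):
--     odd_list = []
--     even_list = []
--
--     for num in arr:
--         if num % 2 == 0:
--             even_list.append(num)
--         else:
--             odd_list.append(num)
--
--     odd_list = merge_sort(odd_list)
--     even_list = merge_sort(even_list)
--
--     return odd_list, even_list
-- ===== SOURCE B (Python) =====
-- def categorize_and_sort(arr):
--     odd_list = []
--     even_list = []
--     for num in sorted(arr):
--         if num % 2 == 0: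
--             even_list.append(num)
--         else:
--             odd_list.append(num)
--     return odd_list, even_list
-- ===== Notes on version B (the rewrite author's own statement) =====
-- stated objective: simpler
-- what changed: B sorts the whole list once with the built-in sorted() and then partitions by parity in a single pass, instead of A's partition-first followed by two hand-written recursive merge sorts.
import Mathlib
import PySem

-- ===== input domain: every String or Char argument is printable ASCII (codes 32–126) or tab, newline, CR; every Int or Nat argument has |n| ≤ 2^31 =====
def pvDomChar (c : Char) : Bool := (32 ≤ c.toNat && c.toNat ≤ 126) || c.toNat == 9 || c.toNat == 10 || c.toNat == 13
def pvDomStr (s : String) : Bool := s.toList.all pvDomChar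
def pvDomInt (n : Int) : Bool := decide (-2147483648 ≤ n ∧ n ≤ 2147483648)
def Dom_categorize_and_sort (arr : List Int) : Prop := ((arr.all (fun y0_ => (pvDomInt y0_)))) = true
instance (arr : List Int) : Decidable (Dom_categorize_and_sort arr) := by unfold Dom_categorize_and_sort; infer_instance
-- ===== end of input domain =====

-- B replaces A's partition-then-two-hand-written-merge-sorts by one global sort followed by a single parity-partition pass (objective: simpler).

-- ===== PORT A =====
-- merge(left_half, right_half): the while loop over left_index / right_index, as index recursion on (li, ri).
def pvMergeLoop (left right : List Int) (li ri : Nat) (res : List Int) : List Int :=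
  if h : li < left.length ∧ ri < right.length then
    if left[li]'h.1 < right[ri]'h.2 then
      pvMergeLoop left right (li + 1) ri (res ++ [left[li]'h.1])
    else
      pvMergeLoop left right li (ri + 1) (res ++ [right[ri]'h.2])
  else
    -- result.extend(left_half[left_index:]); result.extend(right_half[right_index:])
    -- for natural li, left[li:] = left.drop li (PySem.List.slice_from_natCast)
    res ++ left.drop li ++ right.drop ri
termination_by (left.length - li) + (right.length - ri)
decreasing_by all_goals omega

def pvMergeA (left_half right_half : List Int) : List Int :=
  pvMergeLoop left_half right_half 0 0 []

-- merge_sort(arr)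
def pvMergeSortA (arr : List Int) : List Int :=
  if arr.length ≤ 1 then arr
  else
    let mid := arr.length / 2        -- len(arr) // 2: Nat division (len is nonnegative)
    let left_half := arr.take mid    -- arr[:mid]  (PySem.List.slice_to_natCast)
    let right_half := arr.drop mid   -- arr[mid:]  (PySem.List.slice_from_natCast)
    pvMergeA (pvMergeSortA left_half) (pvMergeSortA right_half)
termination_by arr.length
decreasing_by
  · simp; omega
  · simp; omega

-- the for-loop appending each num to even_list / odd_list
def pvPartStep (acc : List Int × List Int) (num : Int) : List Int × List Int :=
  if PySem.Int.mod num 2 = 0 then (acc.1, acc.2 ++ [num]) else (acc.1 ++ [num], acc.2)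

def categorize_and_sort (arr : List Int) : List Int × List Int :=
  let p := arr.foldl pvPartStep ([], [])
  (pvMergeSortA p.1, pvMergeSortA p.2)

-- ===== PORT B =====
def categorize_and_sort_alt (arr : List Int) : List Int × List Int :=
  (PySem.List.sorted arr (fun x => x) false).foldl pvPartStep ([], [])

-- ===== PRECONDITION & SPEC =====
def Spec_categorize_and_sort (arr : List Int) (out : List Int × List Int) : Prop := out = categorize_and_sort_alt arr
instance (arr : List Int) (out : List Int × List Int) : Decidable (Spec_categorize_and_sort arr out) := by unfold Spec_categorize_and_sort; infer_instance

-- ===== CLAIM (what is proved, stated in full; the proofs are below) =====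
def Claim_equal_categorize_and_sort : Prop := ∀ (arr : List Int), Dom_categorize_and_sort arr → Spec_categorize_and_sort arr (categorize_and_sort arr)

-- ===== LEMMAS AND PROOFS =====

-- the partition fold computes the two parity filters
theorem pvPart_foldl (xs o e : List Int) :
    xs.foldl pvPartStep (o, e)
      = (o ++ xs.filter (fun n => !decide (PySem.Int.mod n 2 = 0)),
         e ++ xs.filter (fun n => decide (PySem.Int.mod n 2 = 0))) := by
  induction xs generalizing o e with
  | nil => simp
  | cons a t ih =>
      by_cases h : (2 : Int) ∣ a <;>
        simp [pvPartStep, h, ih]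

-- proof-side two-list merge; the index loop pvMergeLoop is reduced to it
def pvMergeL : List Int → List Int → List Int
  | [], ys => ys
  | xs, [] => xs
  | x :: xs, y :: ys => if x < y then x :: pvMergeL xs (y :: ys) else y :: pvMergeL (x :: xs) ys

theorem pvMergeLoop_eq (left right : List Int) (li ri : Nat) (res : List Int) :
    pvMergeLoop left right li ri res = res ++ pvMergeL (left.drop li) (right.drop ri) := by
  fun_induction pvMergeLoop left right li ri res with
  | case1 li ri res h hlt ih =>
      rw [ih, List.drop_eq_getElem_cons h.1, List.drop_eq_getElem_cons h.2,
        pvMergeL, if_pos hlt]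
      simp
  | case2 li ri res h hlt ih =>
      rw [ih, List.drop_eq_getElem_cons h.1, List.drop_eq_getElem_cons h.2,
        pvMergeL, if_neg hlt]
      simp
  | case3 li ri res h =>
      rcases Nat.lt_or_ge li left.length with h1 | h1
      · have h2 : right.length ≤ ri := by omega
        rw [List.drop_eq_nil_of_le h2]
        rcases hd : left.drop li with _ | ⟨x, xs⟩ <;> simp [pvMergeL]
      · rw [List.drop_eq_nil_of_le h1]
        simp [pvMergeL]

theorem pvMergeL_perm : ∀ (xs ys : List Int), (pvMergeL xs ys).Perm (xs ++ ys)
  | [], ys => by simp [pvMergeL]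
  | x :: xs, [] => by simp [pvMergeL]
  | x :: xs, y :: ys => by
      rw [pvMergeL]
      split_ifs with h
      · exact ((pvMergeL_perm xs (y :: ys)).cons x)
      · exact ((pvMergeL_perm (x :: xs) ys).cons y).trans List.perm_middle.symm

theorem pvMergeL_sorted : ∀ (xs ys : List Int),
    xs.Pairwise (· ≤ ·) → ys.Pairwise (· ≤ ·) → (pvMergeL xs ys).Pairwise (· ≤ ·)
  | [], ys, _, hy => by simpa [pvMergeL] using hy
  | x :: xs, [], hx, _ => by simpa [pvMergeL] using hx
  | x :: xs, y :: ys, hx, hy => by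
      rw [pvMergeL]
      rw [List.pairwise_cons] at hx hy
      split_ifs with h
      · refine List.pairwise_cons.2 ⟨?_, pvMergeL_sorted xs (y :: ys) hx.2 (List.pairwise_cons.2 hy)⟩
        intro b hb
        have hb' := (pvMergeL_perm xs (y :: ys)).mem_iff.1 hb
        rcases List.mem_append.1 hb' with hb'' | hb''
        · exact hx.1 b hb''
        · rcases List.mem_cons.1 hb'' with rfl | hb''
          · exact le_of_lt h
          · exact (le_of_lt h).trans (hy.1 b hb'')
      · refine List.pairwise_cons.2 ⟨?_, pvMergeL_sorted (x :: xs) ys (List.pairwise_cons.2 hx) hy.2⟩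
        intro b hb
        have hb' := (pvMergeL_perm (x :: xs) ys).mem_iff.1 hb
        have hyx : y ≤ x := le_of_not_gt h
        rcases List.mem_append.1 hb' with hb'' | hb''
        · rcases List.mem_cons.1 hb'' with rfl | hb''
          · exact hyx
          · exact hyx.trans (hx.1 b hb'')
        · exact hy.1 b hb''

theorem pvMergeSortA_perm (arr : List Int) : (pvMergeSortA arr).Perm arr := by
  fun_induction pvMergeSortA arr with
  | case1 arr h => exact List.Perm.refl arr
  | case2 arr h mid left_half right_half ih1 ih2 =>
      simp only [pvMergeA, pvMergeLoop_eq, List.drop_zero, List.nil_append]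
      exact ((pvMergeL_perm _ _).trans (ih1.append ih2)).trans
        (List.take_append_drop mid arr ▸ List.Perm.refl arr)

theorem pvMergeSortA_sorted (arr : List Int) : (pvMergeSortA arr).Pairwise (· ≤ ·) := by
  fun_induction pvMergeSortA arr with
  | case1 arr h =>
      rcases arr with _ | ⟨a, _ | ⟨b, t⟩⟩ <;> simp_all
  | case2 arr h mid left_half right_half ih1 ih2 =>
      simp only [pvMergeA, pvMergeLoop_eq, List.drop_zero, List.nil_append]
      exact pvMergeL_sorted _ _ ih1 ih2

theorem pvMergeSortA_eq_sorted (arr : List Int) :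
    pvMergeSortA arr = PySem.List.sorted arr (fun x => x) false :=
  (PySem.List.sorted_id_eq_of_perm_of_pairwise arr (pvMergeSortA arr)
    (pvMergeSortA_perm arr) (pvMergeSortA_sorted arr)).symm

-- filtering commutes with sorting (filter of a sorted permutation is a sorted permutation of the filter)
theorem pvSorted_filter (p : Int → Bool) (xs : List Int) :
    (PySem.List.sorted xs (fun x => x) false).filter p
      = PySem.List.sorted (xs.filter p) (fun x => x) false :=
  (PySem.List.sorted_id_eq_of_perm_of_pairwise (xs.filter p)
    ((PySem.List.sorted xs (fun x => x) false).filter p)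
    ((PySem.List.sorted_perm xs (fun x => x) false).filter p)
    ((PySem.List.sorted_pairwise xs (fun x => x)).filter p)).symm

-- ===== VERDICT (by name: the statement is the Claim_ definition above) =====
theorem categorize_and_sort_spec : Claim_equal_categorize_and_sort := by
  intro arr _
  show categorize_and_sort arr = categorize_and_sort_alt arr
  simp only [categorize_and_sort, categorize_and_sort_alt, pvPart_foldl, List.nil_append,
    pvMergeSortA_eq_sorted, pvSorted_filter]
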